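-- pv_equiv track=rewrite | github.com/pooja080499/PDF_table_extration | pdf_table_extraction.py | _identify_column_positions
-- ===== SOURCE A (Python) =====
-- from collections import defaultdict
--
-- def _identify_column_positions(lines):
--     """Identify column positions based on spacing patterns in a set of lines"""
--     if not lines:
--         return []
--
--     # Find potential column boundaries by looking for consistent spaces
--     space_positions = defaultdict(int)
--
--     for line in lines:
--         # Mark positions where there are spaces
--         for i, char in enumerate(line):
--             if char.isspace():
--                 space_positions[i] += 1
--
--     # Find positions where spaces occur frequently
--     threshold = len(lines) * 0.5  # Space must occur in at least 50% of lines
--     frequent_spaces = [pos for pos, count in space_positions.items() if count >= threshold]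
--
--     # Group adjacent spaces together
--     column_boundaries = []
--     current_group = []
--
--     for pos in sorted(frequent_spaces):
--         if not current_group or pos == current_group[-1] + 1:
--             current_group.append(pos)
--         else:
--             # Take the middle of the space group as the column boundary
--             if current_group:
--                 column_boundaries.append(current_group[len(current_group) // 2])
--             current_group = [pos]
--
--     # Add the last group
--     if current_group:
--         column_boundaries.append(current_group[len(current_group) // 2])
--
--     return sorted(column_boundaries)
-- ===== SOURCE B (Python) =====
-- def _identify_column_positions(lines):
--     """Identify column positions based on spacing patterns in a set of lines"""
--     if not lines:
--         return []
--     n = len(lines)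
--     # one sorted multiset of every (line, position) space occurrence
--     positions = sorted(i for line in lines
--                          for i, ch in enumerate(line) if ch.isspace())
--     boundaries = []
--     run = None          # (start, end) of the current run of frequent positions
--     k, m = 0, len(positions)
--     while k < m:
--         p = positions[k]
--         j = k
--         while j < m and positions[j] == p:
--             j += 1      # the block [k, j) holds every occurrence of p
--         if 2 * (j - k) >= n:        # p is a frequent space position
--             if run is not None and p == run[1] + 1:
--                 run = (run[0], p)
--             else:
--                 if run is not None:
--                     s, e = run
--                     boundaries.append(s + (e - s + 1) // 2)
--                 run = (p, p)
--         k = j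
--     if run is not None:
--         s, e = run
--         boundaries.append(s + (e - s + 1) // 2)
--     return boundaries
-- ===== Notes on version B (the rewrite author's own statement) =====
-- stated objective: alternative
-- what changed: Replaces A's per-column defaultdict counting, dict-items threshold filter, key sort and separate grouping fold with a sort-then-scan over the flattened multiset of all (line,position) space occurrences: one sorted list, a single scan that measures each equal-value block's length as the count and fuses thresholding with run grouping, emitting boundaries in order with no final sort.
import Mathlib
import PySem

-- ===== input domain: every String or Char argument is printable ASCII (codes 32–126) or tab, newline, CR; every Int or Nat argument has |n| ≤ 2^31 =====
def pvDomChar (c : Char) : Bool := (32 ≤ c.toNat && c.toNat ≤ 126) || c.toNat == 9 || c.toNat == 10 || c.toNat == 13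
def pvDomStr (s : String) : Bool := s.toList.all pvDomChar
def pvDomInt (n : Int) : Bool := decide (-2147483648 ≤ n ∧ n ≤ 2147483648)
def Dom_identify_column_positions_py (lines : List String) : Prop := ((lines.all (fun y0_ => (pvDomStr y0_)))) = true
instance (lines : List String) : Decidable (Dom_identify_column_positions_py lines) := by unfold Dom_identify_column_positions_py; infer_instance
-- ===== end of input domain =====

-- B replaces A's per-column dict counting + threshold filter + sort + grouping fold with a
-- sort-then-scan over the flattened multiset of all space occurrences, fusing block-length
-- counting, thresholding and run grouping in one scan (objective: alternative; same value).

-- ===== PORT A =====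
-- one step of A's inner loop: 'if char.isspace(): space_positions[i] += 1'
def pvDStep : PySem.Dict Int Int → Int × Char → PySem.Dict Int Int :=
  fun d p => if PySem.Chars.isspace p.2 then d.modify p.1 0 (· + 1) else d

-- one step of A's grouping loop over (column_boundaries, current_group)
def pvStep : List Int × List Int → Int → List Int × List Int :=
  fun st pos =>
    if st.2 = [] ∨ pos = st.2.getLastD 0 + 1 then (st.1, st.2 ++ [pos])
    else (st.1 ++ [st.2.getD (st.2.length / 2) 0], [pos])

def identify_column_positions_py (lines : List String) : List Int :=
  if lines = [] then []
  else
    -- space_positions = defaultdict(int); for line: for i, char in enumerate(line): ...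
    let space_positions : PySem.Dict Int Int :=
      lines.foldl (fun d line => (PySem.List.enumerate line.toList 0).foldl pvDStep d)
        PySem.Dict.empty
    -- 'count >= len(lines) * 0.5' compared exactly: for ints count, n it is 2*count ≥ n
    let frequent_spaces : List Int :=
      (space_positions.items.filter (fun p => 2 * p.2 ≥ (lines.length : Int))).map (·.1)
    let st := (PySem.List.sorted frequent_spaces (fun x => x)).foldl pvStep ([], [])
    -- 'if current_group: column_boundaries.append(current_group[len(current_group) // 2])'
    let column_boundaries :=
      if st.2 = [] then st.1 else st.1 ++ [st.2.getD (st.2.length / 2) 0]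
    PySem.List.sorted column_boundaries (fun x => x)

-- ===== PORT B =====
-- the while loop of Source B: each step consumes one maximal block of equal positions
-- (the inner 'while j < m and positions[j] == p'), thresholds its length against n,
-- and maintains the current run (run_start, run_end) and the boundary accumulator
def pvScanB (n : Int) (acc : List Int) (run : Option (Int × Int)) : List Int → List Int
  | [] =>
    -- 'if run is not None: boundaries.append(s + (e - s + 1) // 2)'
    match run with
    | none => acc
    | some se => acc ++ [se.1 + PySem.Int.floordiv (se.2 - se.1 + 1) 2]
  | p :: rest =>
    let blk := rest.takeWhile (fun q => q == p)
    let rest' := rest.dropWhile (fun q => q == p)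
    let cnt : Int := blk.length + 1          -- j - k
    if 2 * cnt ≥ n then
      match run with
      | some se =>
        if p = se.2 + 1 then pvScanB n acc (some (se.1, p)) rest'
        else pvScanB n (acc ++ [se.1 + PySem.Int.floordiv (se.2 - se.1 + 1) 2]) (some (p, p)) rest'
      | none => pvScanB n acc (some (p, p)) rest'
    else pvScanB n acc run rest'
termination_by ps => ps.length
decreasing_by all_goals (simp only [List.length_cons]; exact Nat.lt_succ_of_le (List.length_dropWhile_le _ _))

def identify_column_positions_py_alt (lines : List String) : List Int :=
  if lines = [] then []
  else
    let n : Int := lines.length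
    -- sorted(i for line in lines for i, ch in enumerate(line) if ch.isspace())
    let positions : List Int :=
      PySem.List.sorted
        (lines.flatMap (fun line =>
          (PySem.List.enumerate line.toList 0).filterMap
            (fun p => if PySem.Chars.isspace p.2 then some p.1 else none)))
        (fun x => x)
    pvScanB n [] none positions

-- ===== PRECONDITION & SPEC =====
def Spec_identify_column_positions_py (lines : List String) (out : List Int) : Prop := out = identify_column_positions_py_alt lines
instance (lines : List String) (out : List Int) : Decidable (Spec_identify_column_positions_py lines out) := by unfold Spec_identify_column_positions_py; infer_instance

-- ===== CLAIM (what is proved, stated in full; the proofs are below) =====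
def Claim_equal_identify_column_positions_py : Prop := ∀ (lines : List String), Dom_identify_column_positions_py lines → Spec_identify_column_positions_py lines (identify_column_positions_py lines)

-- ===== LEMMAS AND PROOFS =====

-- proof-side names for the values the two ports compute with
def pvW (lines : List String) : Nat := (lines.map (fun line => line.toList.length)).foldl max 0
def pvHasSpaceAt (cs : List Char) (j : Nat) : Bool :=
  if h : j < cs.length then PySem.Chars.isspace cs[j] else false
def pvKeepB (lines : List String) (j : Nat) : Bool :=
  decide (2 * lines.countP (fun line => pvHasSpaceAt line.toList j) ≥ lines.length)
def pvCnt (lines : List String) (j : Nat) : Nat := lines.countP (fun line => pvHasSpaceAt line.toList j)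
-- the kept (frequent) positions from column j upward, in increasing order
def pvFfrom (lines : List String) (j : Nat) : List Int :=
  ((List.range' j (pvW lines - j)).filter (pvKeepB lines)).map (fun i : Nat => (i : Int))
-- the columns s, s+1, ..., j-1 as Ints (a current_group of A's loop)
def pvSeg (s j : Nat) : List Int := (List.range' s (j - s)).map (fun i : Nat => (i : Int))
-- 'current_group[len(current_group) // 2]'
def pvMid (cg : List Int) : Int := cg.getD (cg.length / 2) 0
-- the sorted multiset of space occurrences from column j upward, block by block
def pvBlocks (lines : List String) (j : Nat) : List Int :=
  (List.range' j (pvW lines - j)).flatMap (fun p => List.replicate (pvCnt lines p) ((p : Nat) : Int))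

-- A's grouping loop, recursively (cg is the nonempty current group)
def pvGroupRec : List Int → List Int → List Int
  | cg, [] => [pvMid cg]
  | cg, p :: rest =>
    if p = cg.getLastD 0 + 1 then pvGroupRec (cg ++ [p]) rest
    else pvMid cg :: pvGroupRec [p] rest

def pvGroupTop : List Int → List Int
  | [] => []
  | x :: r => pvGroupRec [x] r

theorem pvL1 (cs : List Char) (s : Int) (d : PySem.Dict Int Int) (k : Int) :
    ((PySem.List.enumerate cs s).foldl pvDStep d).getD k 0
      = d.getD k 0 + (if s ≤ k ∧ pvHasSpaceAt cs (k - s).toNat then 1 else 0) := by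
  induction cs generalizing s d with
  | nil => simp [PySem.List.enumerate, pvHasSpaceAt]
  | cons c cs ih =>
    rw [PySem.List.enumerate_cons]
    simp only [List.foldl_cons]
    rw [ih]
    have hstep : (pvDStep d (s, c)).getD k 0
        = d.getD k 0 + (if k = s ∧ PySem.Chars.isspace c then 1 else 0) := by
      unfold pvDStep
      by_cases hs : PySem.Chars.isspace c
      · simp only [hs, if_true]
        rw [PySem.Dict.getD_modify]
        split_ifs with h1 h2 h2 <;> simp_all <;> omega
      · simp [hs]
    rw [hstep]
    have hsplit : (if s ≤ k ∧ pvHasSpaceAt (c :: cs) (k - s).toNat then (1:Int) else 0)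
        = (if k = s ∧ PySem.Chars.isspace c then 1 else 0)
          + (if s + 1 ≤ k ∧ pvHasSpaceAt cs (k - (s + 1)).toNat then 1 else 0) := by
      by_cases hk : k = s
      · subst hk
        simp [pvHasSpaceAt]
      · by_cases hk2 : s ≤ k
        · have hk3 : s + 1 ≤ k := by omega
          have : (k - s).toNat = (k - (s+1)).toNat + 1 := by omega
          rw [this]
          simp only [pvHasSpaceAt]
          have : ∀ (h : (k - (s+1)).toNat + 1 < (c :: cs).length),
              (c :: cs)[(k - (s+1)).toNat + 1] = cs[(k - (s+1)).toNat]'(by simpa using h) := by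
            intro h; simp
          simp only [List.length_cons]
          split_ifs with h1 h2 h2 <;> simp_all <;> omega
        · have h4 : ¬ (s < k) := by omega
          simp [hk, hk2, h4]
    rw [hsplit]; ring

theorem pvL2 (lines : List String) (d : PySem.Dict Int Int) (k : Int) :
    (lines.foldl (fun d line => (PySem.List.enumerate line.toList 0).foldl pvDStep d) d).getD k 0
      = d.getD k 0 + (if 0 ≤ k then (pvCnt lines k.toNat : Int) else 0) := by
  induction lines generalizing d with
  | nil => simp [pvCnt]
  | cons line rest ih =>
    simp only [List.foldl_cons]
    rw [ih, pvL1]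
    have : pvCnt (line :: rest) k.toNat
        = (if pvHasSpaceAt line.toList k.toNat then 1 else 0) + pvCnt rest k.toNat := by
      simp only [pvCnt, List.countP_cons]
      split_ifs <;> omega
    rw [this]
    by_cases hk : 0 ≤ k
    · have : k - 0 = k := by ring
      simp only [hk, this, if_true, and_true, true_and]
      push_cast
      split_ifs <;> simp_all <;> ring
    · have : ¬ (0 : Int) ≤ k := hk
      simp [this, hk]

theorem pvL3 (lines : List String) (d : PySem.Dict Int Int)
    (hnd : d.keys.Nodup) (hmem : ∀ k, k ∈ d.keys ↔ 0 < d.getD k 0) :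
    (lines.foldl (fun d line => (PySem.List.enumerate line.toList 0).foldl pvDStep d) d).keys.Nodup ∧
      ∀ k, k ∈ (lines.foldl (fun d line => (PySem.List.enumerate line.toList 0).foldl pvDStep d) d).keys ↔
          0 < (lines.foldl (fun d line => (PySem.List.enumerate line.toList 0).foldl pvDStep d) d).getD k 0 := by
  have step : ∀ (p : Int × Char) (d : PySem.Dict Int Int), d.keys.Nodup →
      (∀ k, k ∈ d.keys ↔ 0 < d.getD k 0) →
      (pvDStep d p).keys.Nodup ∧ ∀ k, k ∈ (pvDStep d p).keys ↔ 0 < (pvDStep d p).getD k 0 := by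
    rintro ⟨j, c⟩ d hnd hmem
    unfold pvDStep
    by_cases hs : PySem.Chars.isspace c
    · simp only [hs, if_true]
      have hkeys : (d.modify j 0 (· + 1)).keys = (d.insert j (d.getD j 0 + 1)).keys :=
        PySem.Dict.keys_modify d j 0 (· + 1)
      constructor
      · rw [hkeys]; exact PySem.Dict.nodup_keys_insert d j _ hnd
      · intro k
        rw [hkeys, PySem.Dict.mem_keys_insert, PySem.Dict.getD_modify]
        by_cases hkj : k = j
        · subst hkj
          have h0 : 0 ≤ d.getD k 0 := by
            by_cases hin : k ∈ d.keys
            · have := (hmem k).mp hin; omega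
            · have hc : d.contains k = false := by
                by_contra hcc
                simp only [Bool.not_eq_false] at hcc
                exact hin ((PySem.Dict.contains_iff_mem_keys d k).mp hcc)
              rw [PySem.Dict.getD_of_not_contains d 0 hc]
          rw [if_pos rfl]
          exact ⟨fun _ => by omega, fun _ => Or.inl rfl⟩
        · rw [if_neg hkj]
          simp only [hkj, false_or]
          exact hmem k
    · simp only [hs, if_false]
      exact ⟨hnd, hmem⟩
  have lineStep : ∀ (l : List (Int × Char)) (d : PySem.Dict Int Int), d.keys.Nodup →
      (∀ k, k ∈ d.keys ↔ 0 < d.getD k 0) →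
      (l.foldl pvDStep d).keys.Nodup ∧ ∀ k, k ∈ (l.foldl pvDStep d).keys ↔ 0 < (l.foldl pvDStep d).getD k 0 := by
    intro l
    induction l with
    | nil => intro d h1 h2; exact ⟨h1, h2⟩
    | cons p l ih =>
      intro d h1 h2
      obtain ⟨h1', h2'⟩ := step p d h1 h2
      exact ih _ h1' h2'
  induction lines generalizing d with
  | nil => exact ⟨hnd, hmem⟩
  | cons line rest ih =>
    simp only [List.foldl_cons]
    obtain ⟨h1, h2⟩ := lineStep (PySem.List.enumerate line.toList 0) d hnd hmem
    exact ih _ h1 h2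

theorem pvFoldlMax_le (xs : List Nat) (a : Nat) : a ≤ xs.foldl max a := by
  induction xs generalizing a with
  | nil => simp
  | cons y ys ih => exact le_trans (le_max_left a y) (ih (max a y))

theorem pvMem_le_foldlMax (xs : List Nat) (a x : Nat) : x ∈ xs → x ≤ xs.foldl max a := by
  induction xs generalizing a with
  | nil => intro hx; simp at hx
  | cons y ys ih =>
    intro hx
    rcases List.mem_cons.mp hx with rfl | hx
    · exact le_trans (le_max_right a x) (pvFoldlMax_le ys (max a x))
    · exact ih (max a y) hx

theorem pvCnt_lt_W (lines : List String) (j : Nat) (h : 0 < pvCnt lines j) : j < pvW lines := by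
  have h2 : ∃ line ∈ lines, pvHasSpaceAt line.toList j := by
    by_contra hc
    push_neg at hc
    have : pvCnt lines j = 0 := by
      simp only [pvCnt, List.countP_eq_zero]
      intro a ha; simpa using hc a ha
    omega
  obtain ⟨line, hmem, hsp⟩ := h2
  have hlen : j < line.toList.length := by
    unfold pvHasSpaceAt at hsp
    split at hsp
    · assumption
    · simp at hsp
  have hW : line.toList.length ≤ pvW lines :=
    pvMem_le_foldlMax _ 0 _ (List.mem_map.mpr ⟨line, hmem, rfl⟩)
  omega

theorem pvSortedFreq (lines : List String) (hne : lines ≠ []) :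
    PySem.List.sorted
      (((lines.foldl (fun d line => (PySem.List.enumerate line.toList 0).foldl pvDStep d)
          PySem.Dict.empty).items.filter
            (fun p => 2 * p.2 ≥ (lines.length : Int))).map (·.1)) (fun x => x)
      = pvFfrom lines 0 := by
  have hn1 : 0 < lines.length := List.length_pos_iff.mpr hne
  set d := (lines.foldl (fun d line => (PySem.List.enumerate line.toList 0).foldl pvDStep d)
          PySem.Dict.empty) with hd
  obtain ⟨hnd, hmem⟩ := pvL3 lines PySem.Dict.empty (by simp [PySem.Dict.keys_empty]) (by
    intro k; simp [PySem.Dict.keys_empty, PySem.Dict.getD_empty])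
  rw [← hd] at hnd hmem
  have hget : ∀ k : Int, d.getD k 0 = if 0 ≤ k then (pvCnt lines k.toNat : Int) else 0 := by
    intro k; rw [hd, pvL2]; simp [PySem.Dict.getD_empty]
  have hitems : (d.items.filter (fun p => 2 * p.2 ≥ (lines.length : Int))).map (·.1)
      = d.keys.filter (fun k => 2 * d.getD k 0 ≥ (lines.length : Int)) := by
    rw [PySem.Dict.items_eq_map_keys d hnd 0, List.filter_map, List.map_map]
    simp [Function.comp_def]
  rw [hitems]
  have hcond : ∀ k : Int,
      (k ∈ d.keys.filter (fun k => 2 * d.getD k 0 ≥ (lines.length : Int))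
        ↔ (0 ≤ k ∧ k.toNat < pvW lines ∧ pvKeepB lines k.toNat = true)) := by
    intro k
    rw [List.mem_filter]
    constructor
    · rintro ⟨hk, hc⟩
      have hpos := (hmem k).mp hk
      rw [hget] at hpos hc
      by_cases h0 : 0 ≤ k
      · rw [if_pos h0] at hpos hc
        have hcn : 0 < pvCnt lines k.toNat := by exact_mod_cast hpos
        refine ⟨h0, pvCnt_lt_W lines _ hcn, ?_⟩
        simp only [pvKeepB, pvCnt, decide_eq_true_eq] at hc ⊢
        omega
      · rw [if_neg h0] at hpos; omega
    · rintro ⟨h0, hlt, hkeep⟩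
      simp only [pvKeepB, decide_eq_true_eq] at hkeep
      have hcn : 0 < pvCnt lines k.toNat := by unfold pvCnt; omega
      have hg : d.getD k 0 = (pvCnt lines k.toNat : Int) := by rw [hget, if_pos h0]
      refine ⟨(hmem k).mpr (by rw [hg]; exact_mod_cast hcn), ?_⟩
      rw [hg]
      simp only [ge_iff_le, decide_eq_true_eq]
      unfold pvCnt at *
      omega
  have hcondF : ∀ k : Int,
      (k ∈ pvFfrom lines 0 ↔ (0 ≤ k ∧ k.toNat < pvW lines ∧ pvKeepB lines k.toNat = true)) := by
    intro k
    simp only [pvFfrom, Nat.sub_zero, List.mem_map, List.mem_filter, List.mem_range'_1]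
    constructor
    · rintro ⟨j, ⟨⟨_, hj⟩, hk⟩, rfl⟩
      simpa using ⟨by omega, hk⟩
    · rintro ⟨h0, hlt, hk⟩
      exact ⟨k.toNat, ⟨⟨by omega, by omega⟩, hk⟩, by omega⟩
  apply PySem.List.sorted_eq_of_perm_of_pairwise_lt
  · rw [List.perm_ext_iff_of_nodup]
    · intro k; rw [hcond, hcondF]
    · refine List.Nodup.map ?_ (List.Nodup.filter _ (List.nodup_range' ..))
      exact fun a b h => by exact_mod_cast h
    · exact List.Nodup.filter _ hnd
  · refine List.Pairwise.map _ (fun a b h => by exact_mod_cast h)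
      (List.Pairwise.filter _ (List.pairwise_lt_range' ..))

theorem pvFoldEq (F : List Int) : ∀ bnds cg, cg ≠ [] →
    (if (F.foldl pvStep (bnds, cg)).2 = [] then (F.foldl pvStep (bnds, cg)).1
     else (F.foldl pvStep (bnds, cg)).1
        ++ [(F.foldl pvStep (bnds, cg)).2.getD ((F.foldl pvStep (bnds, cg)).2.length / 2) 0])
    = bnds ++ pvGroupRec cg F := by
  induction F with
  | nil =>
    intro bnds cg hcg
    simp only [List.foldl_nil, pvGroupRec]
    rw [if_neg hcg]
    rfl
  | cons p F ih =>
    intro bnds cg hcg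
    simp only [List.foldl_cons]
    by_cases hc : p = cg.getLastD 0 + 1
    · have hstep : pvStep (bnds, cg) p = (bnds, cg ++ [p]) := by
        simp [pvStep, hc]
      rw [hstep, ih bnds (cg ++ [p]) (by simp), pvGroupRec, if_pos hc]
    · have hstep : pvStep (bnds, cg) p = (bnds ++ [cg.getD (cg.length / 2) 0], [p]) := by
        unfold pvStep
        rw [if_neg (by rintro (h | h); exacts [hcg h, hc h])]
      rw [hstep, ih (bnds ++ [cg.getD (cg.length / 2) 0]) [p] (by simp), pvGroupRec, if_neg hc]
      simp [pvMid]

theorem pvMid_mem (cg : List Int) (hcg : cg ≠ []) : pvMid cg ∈ cg := by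
  have hl : 0 < cg.length := List.length_pos_iff.mpr hcg
  have : cg.length / 2 < cg.length := by omega
  rw [pvMid, List.getD_eq_getElem cg 0 this]
  exact List.getElem_mem this

theorem pvGroupRec_mem (cg F : List Int) (hcg : cg ≠ []) :
    ∀ y ∈ pvGroupRec cg F, y ∈ cg ++ F := by
  induction F generalizing cg with
  | nil =>
    intro y hy
    simp only [pvGroupRec, List.mem_singleton] at hy
    subst hy
    exact List.mem_append_left _ (pvMid_mem cg hcg)
  | cons p F ih =>
    intro y hy
    rw [pvGroupRec] at hy
    split at hy
    · have := ih (cg ++ [p]) (by simp) y hy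
      simpa [List.append_assoc] using this
    · rcases List.mem_cons.mp hy with rfl | hy
      · exact List.mem_append_left _ (pvMid_mem cg hcg)
      · have := ih [p] (by simp) y hy
        simp only [List.cons_append, List.nil_append] at this
        rcases List.mem_cons.mp this with rfl | h
        · simp
        · simp [h]

theorem pvGroupRec_pairwise (cg F : List Int) (hcg : cg ≠ [])
    (h : (cg ++ F).Pairwise (· < ·)) : (pvGroupRec cg F).Pairwise (· < ·) := by
  induction F generalizing cg with
  | nil => simp [pvGroupRec]
  | cons p F ih =>
    rw [pvGroupRec]
    split
    · exact ih (cg ++ [p]) (by simp) (by simpa [List.append_assoc] using h)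
    · refine List.pairwise_cons.mpr ⟨?_, ih [p] (by simp) ?_⟩
      · intro y hy
        have hmem := pvGroupRec_mem [p] F (by simp) y hy
        have hmid := pvMid_mem cg hcg
        simp only [List.cons_append, List.nil_append] at hmem
        have hp := List.pairwise_append.mp h
        exact hp.2.2 _ hmid _ hmem
      · have hp := (List.pairwise_append.mp h).2.1
        simpa using hp

theorem pvFfrom_nil (lines : List String) (j : Nat) (h : pvW lines ≤ j) :
    pvFfrom lines j = [] := by
  unfold pvFfrom
  rw [(by omega : pvW lines - j = 0)]
  simp

theorem pvFfrom_skip (lines : List String) (j : Nat) (h : j < pvW lines)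
    (hk : pvKeepB lines j = false) : pvFfrom lines j = pvFfrom lines (j + 1) := by
  unfold pvFfrom
  rw [(by omega : pvW lines - j = (pvW lines - (j+1)) + 1), List.range'_succ, List.filter_cons,
    hk]
  simp

theorem pvFfrom_cons (lines : List String) (j : Nat) (h : j < pvW lines)
    (hk : pvKeepB lines j = true) : pvFfrom lines j = (j : Int) :: pvFfrom lines (j + 1) := by
  unfold pvFfrom
  rw [(by omega : pvW lines - j = (pvW lines - (j+1)) + 1), List.range'_succ, List.filter_cons,
    hk]
  simp

theorem pvSeg_single (s : Nat) : pvSeg s (s + 1) = [(s : Int)] := by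
  unfold pvSeg
  rw [(by omega : s + 1 - s = 1)]
  simp

theorem pvSeg_concat (s j : Nat) (h : s ≤ j) : pvSeg s j ++ [(j : Int)] = pvSeg s (j + 1) := by
  unfold pvSeg
  rw [(by omega : j + 1 - s = (j - s) + 1), List.range'_concat, List.map_append]
  simp
  omega

theorem pvSeg_getLastD (s j : Nat) (h : s < j) :
    (pvSeg s j).getLastD 0 = ((j - 1 : Nat) : Int) := by
  have : pvSeg s j = pvSeg s (j - 1) ++ [((j - 1 : Nat) : Int)] := by
    rw [pvSeg_concat s (j - 1) (by omega), (by omega : j - 1 + 1 = j)]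
  rw [this]
  simp

theorem pvMid_seg (s j : Nat) (h : s < j) :
    pvMid (pvSeg s j) = ((s + (j - s) / 2 : Nat) : Int) := by
  unfold pvMid pvSeg
  have hlen : ((List.range' s (j - s)).map (fun i : Nat => (i : Int))).length = j - s := by simp
  rw [hlen]
  have hlt : (j - s) / 2 < j - s := by omega
  rw [List.getD_eq_getElem _ 0 (by simpa using hlt)]
  simp

-- B's run middle 's + (e - s + 1) // 2' equals A's 'current_group[len // 2]' for the run s..e
theorem pvMidB (s e : Nat) (h : s ≤ e) :
    ((s : Int) + PySem.Int.floordiv ((e : Int) - (s : Int) + 1) 2) = pvMid (pvSeg s (e + 1)) := by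
  rw [pvMid_seg s (e + 1) (by omega)]
  have h1 : ((e : Int) - (s : Int) + 1) = ((e - s + 1 : Nat) : Int) := by push_cast; omega
  rw [h1, (by norm_num : (2 : Int) = ((2 : Nat) : Int)), PySem.Int.floordiv_natCast]
  push_cast
  omega

-- ===== the sorted multiset of space occurrences =====

-- per-line occurrence count of position k
theorem pvCountLine (cs : List Char) (s k : Int) :
    ((PySem.List.enumerate cs s).filterMap
        (fun p => if PySem.Chars.isspace p.2 then some p.1 else none)).count k
      = (if s ≤ k ∧ pvHasSpaceAt cs (k - s).toNat then 1 else 0) := by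
  induction cs generalizing s with
  | nil => simp [PySem.List.enumerate, pvHasSpaceAt]
  | cons c cs ih =>
    rw [PySem.List.enumerate_cons]
    simp only [List.filterMap_cons]
    have hsplit : (if s ≤ k ∧ pvHasSpaceAt (c :: cs) (k - s).toNat then (1:Nat) else 0)
        = (if k = s ∧ PySem.Chars.isspace c then 1 else 0)
          + (if s + 1 ≤ k ∧ pvHasSpaceAt cs (k - (s + 1)).toNat then 1 else 0) := by
      by_cases hk : k = s
      · subst hk
        simp [pvHasSpaceAt]
      · by_cases hk2 : s ≤ k
        · have hk3 : s + 1 ≤ k := by omega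
          have : (k - s).toNat = (k - (s+1)).toNat + 1 := by omega
          rw [this]
          simp only [pvHasSpaceAt]
          have : ∀ (h : (k - (s+1)).toNat + 1 < (c :: cs).length),
              (c :: cs)[(k - (s+1)).toNat + 1] = cs[(k - (s+1)).toNat]'(by simpa using h) := by
            intro h; simp
          simp only [List.length_cons]
          split_ifs with h1 h2 h2 <;> simp_all <;> omega
        · have h4 : ¬ (s + 1 ≤ k) := by omega
          simp [hk, hk2, h4]
    rw [hsplit]
    by_cases hs : PySem.Chars.isspace c
    · simp only [hs, if_true, List.count_cons, ih, beq_iff_eq, and_true]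
      have : (if s = k then (1:Nat) else 0) = if k = s then 1 else 0 := by
        split_ifs <;> omega
      rw [this, Nat.add_comm]
    · simp only [hs, Bool.false_eq_true, and_false, if_false, ih, Nat.zero_add]

theorem pvCountMultiset (lines : List String) (k : Int) :
    (lines.flatMap (fun line =>
        (PySem.List.enumerate line.toList 0).filterMap
          (fun p => if PySem.Chars.isspace p.2 then some p.1 else none))).count k
      = if 0 ≤ k then pvCnt lines k.toNat else 0 := by
  induction lines with
  | nil => simp [pvCnt]
  | cons line rest ih =>
    rw [List.flatMap_cons, List.count_append, ih, pvCountLine]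
    have : pvCnt (line :: rest) k.toNat
        = (if pvHasSpaceAt line.toList k.toNat then 1 else 0) + pvCnt rest k.toNat := by
      simp only [pvCnt, List.countP_cons]
      split_ifs <;> omega
    by_cases hk : 0 ≤ k
    · rw [if_pos hk, if_pos hk, this]
      have h0 : k - 0 = k := by ring
      simp only [h0, hk, true_and]
    · have h2 : ¬ (0 : Int) ≤ k := hk
      simp [hk, h2]

theorem pvBlocks_count (lines : List String) (k : Int) :
    (pvBlocks lines 0).count k
      = if 0 ≤ k ∧ k.toNat < pvW lines then pvCnt lines k.toNat else 0 := by
  unfold pvBlocks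
  rw [Nat.sub_zero]
  have : ∀ (l : List Nat), l.Nodup →
      (l.flatMap (fun p => List.replicate (pvCnt lines p) ((p : Nat) : Int))).count k
        = if 0 ≤ k ∧ k.toNat ∈ l then pvCnt lines k.toNat else 0 := by
    intro l
    induction l with
    | nil => simp
    | cons p l ihl =>
      intro hnd
      obtain ⟨hp, hnd'⟩ := List.nodup_cons.mp hnd
      rw [List.flatMap_cons, List.count_append, ihl hnd', List.count_replicate]
      by_cases hk : k = (p : Int)
      · subst hk
        rw [Int.toNat_natCast]
        rw [if_pos (by simp), if_neg (fun h => hp h.2),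
          if_pos ⟨by positivity, List.mem_cons_self ..⟩]
        simp
      · have h1 : ¬ (((p : Nat) : Int) == k) := by simpa using fun h => hk h.symm
        rw [if_neg (by simpa using h1)]
        by_cases h0 : 0 ≤ k
        · have h2 : k.toNat ≠ p := by omega
          simp [h0, h2]
        · simp [h0]
  rw [this _ (List.nodup_range' ..)]
  congr 1
  simp only [List.mem_range'_1, eq_iff_iff]
  constructor
  · rintro ⟨h0, h1, h2⟩; exact ⟨h0, by omega⟩
  · rintro ⟨h0, hlt⟩; exact ⟨h0, by omega, by omega⟩

theorem pvBlocks_step (lines : List String) (j : Nat) (h : j < pvW lines) :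
    pvBlocks lines j
      = List.replicate (pvCnt lines j) ((j : Nat) : Int) ++ pvBlocks lines (j + 1) := by
  unfold pvBlocks
  rw [(by omega : pvW lines - j = (pvW lines - (j+1)) + 1), List.range'_succ, List.flatMap_cons]

theorem pvBlocks_nil (lines : List String) (j : Nat) (h : pvW lines ≤ j) :
    pvBlocks lines j = [] := by
  unfold pvBlocks
  rw [(by omega : pvW lines - j = 0)]
  simp

theorem pvBlocks_lb (lines : List String) (j : Nat) :
    ∀ x ∈ pvBlocks lines j, (j : Int) ≤ x := by
  intro x hx
  unfold pvBlocks at hx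
  obtain ⟨p, hp, hxr⟩ := List.mem_flatMap.mp hx
  have := List.mem_range'_1.mp hp
  rw [List.eq_of_mem_replicate hxr]
  exact_mod_cast this.1

theorem pvBlocks_pairwise (lines : List String) (j : Nat) :
    (pvBlocks lines j).Pairwise (· ≤ ·) := by
  induction hfuel : pvW lines - j generalizing j with
  | zero =>
    rw [pvBlocks_nil lines j (by omega)]
    exact List.Pairwise.nil
  | succ m ih =>
    have hlt : j < pvW lines := by omega
    have ih' := ih (j + 1) (by omega)
    rw [pvBlocks_step lines j hlt, List.pairwise_append]
    refine ⟨List.pairwise_replicate.mpr (by simp), ih', ?_⟩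
    intro a ha b hb
    rw [List.eq_of_mem_replicate ha]
    have := pvBlocks_lb lines (j + 1) b hb
    omega

theorem pvSortedPositions (lines : List String) :
    PySem.List.sorted
      (lines.flatMap (fun line =>
        (PySem.List.enumerate line.toList 0).filterMap
          (fun p => if PySem.Chars.isspace p.2 then some p.1 else none)))
      (fun x => x)
      = pvBlocks lines 0 := by
  apply PySem.List.sorted_id_eq_of_perm_of_pairwise
  · rw [List.perm_iff_count]
    intro k
    rw [pvBlocks_count, pvCountMultiset]
    by_cases h0 : 0 ≤ k
    · by_cases hW : k.toNat < pvW lines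
      · simp [h0, hW]
      · rw [if_pos h0, if_neg (by tauto)]
        by_contra hne
        have : 0 < pvCnt lines k.toNat := by omega
        exact hW (pvCnt_lt_W lines _ this)
    · simp [h0]
  · exact pvBlocks_pairwise lines 0

-- ===== the scan over the blocks =====

theorem pvScanB_nil (n : Int) (acc : List Int) (run : Option (Int × Int)) :
    pvScanB n acc run []
      = match run with
        | none => acc
        | some se => acc ++ [se.1 + PySem.Int.floordiv (se.2 - se.1 + 1) 2] := by
  rw [pvScanB.eq_def]

theorem pvTakeWhile_rep {p : Int} (c : Nat) (R : List Int)
    (hR : ∀ x ∈ R, ¬ ((x == p) = true)) :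
    (List.replicate c p ++ R).takeWhile (fun q => q == p) = List.replicate c p ∧
    (List.replicate c p ++ R).dropWhile (fun q => q == p) = R := by
  induction c with
  | zero =>
    simp only [List.replicate_zero, List.nil_append]
    cases R with
    | nil => simp
    | cons x R =>
      have := hR x (List.mem_cons_self ..)
      rw [List.takeWhile_cons, List.dropWhile_cons]
      simp_all
  | succ c ih =>
    rw [List.replicate_succ, List.cons_append, List.takeWhile_cons, List.dropWhile_cons]
    simp only [BEq.rfl, if_true]
    exact ⟨by rw [ih.1], ih.2⟩

-- the scan's unfolding on one maximal block (c + 1 occurrences of p, rest strictly above p)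
theorem pvScanB_block (n : Int) (acc : List Int) (run : Option (Int × Int)) (p : Int)
    (c : Nat) (R : List Int) (hR : ∀ x ∈ R, p < x) :
    pvScanB n acc run (p :: (List.replicate c p ++ R))
      = if 2 * ((c : Int) + 1) ≥ n then
          match run with
          | some se =>
            if p = se.2 + 1 then pvScanB n acc (some (se.1, p)) R
            else pvScanB n (acc ++ [se.1 + PySem.Int.floordiv (se.2 - se.1 + 1) 2]) (some (p, p)) R
          | none => pvScanB n acc (some (p, p)) R
        else pvScanB n acc run R := by
  have hR' : ∀ x ∈ R, ¬ ((x == p) = true) := by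
    intro x hx h
    have := hR x hx
    rw [beq_iff_eq] at h
    omega
  obtain ⟨ht, hd⟩ := pvTakeWhile_rep c R hR'
  rw [pvScanB.eq_def]
  simp only [ht, hd, List.length_replicate]

theorem pvScanMain (lines : List String) (hne : lines ≠ []) (m : Nat) :
    (∀ (acc : List Int) (j : Nat), pvW lines - j ≤ m →
        pvScanB (lines.length) acc none (pvBlocks lines j)
          = acc ++ pvGroupTop (pvFfrom lines j))
    ∧ (∀ (acc : List Int) (s e j : Nat), s ≤ e → e < j → pvW lines - j ≤ m →
        pvScanB (lines.length) acc (some ((s : Int), (e : Int))) (pvBlocks lines j)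
          = acc ++ pvGroupRec (pvSeg s (e + 1)) (pvFfrom lines j)) := by
  have hn1 : 0 < lines.length := List.length_pos_iff.mpr hne
  induction m with
  | zero =>
    constructor
    · intro acc j hj
      rw [pvBlocks_nil lines j (by omega), pvFfrom_nil lines j (by omega), pvScanB_nil]
      show acc = acc ++ pvGroupTop []
      simp [pvGroupTop]
    · intro acc s e j hse hej hj
      rw [pvBlocks_nil lines j (by omega), pvFfrom_nil lines j (by omega), pvScanB_nil]
      show acc ++ [(s : Int) + PySem.Int.floordiv ((e : Int) - (s : Int) + 1) 2]
          = acc ++ pvGroupRec (pvSeg s (e + 1)) []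
      rw [pvGroupRec, pvMidB s e hse]
  | succ m ih =>
    have hstep : ∀ (acc : List Int) (run : Option (Int × Int)) (j : Nat), j < pvW lines →
        0 < pvCnt lines j →
        pvScanB (lines.length) acc run (pvBlocks lines j)
          = if pvKeepB lines j = true then
              match run with
              | some se =>
                if (j : Int) = se.2 + 1 then
                  pvScanB (lines.length) acc (some (se.1, (j : Int))) (pvBlocks lines (j + 1))
                else pvScanB (lines.length)
                    (acc ++ [se.1 + PySem.Int.floordiv (se.2 - se.1 + 1) 2])
                    (some ((j : Int), (j : Int))) (pvBlocks lines (j + 1))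
              | none => pvScanB (lines.length) acc (some ((j : Int), (j : Int))) (pvBlocks lines (j + 1))
            else pvScanB (lines.length) acc run (pvBlocks lines (j + 1)) := by
      intro acc run j hj hc
      rw [pvBlocks_step lines j hj,
        (by omega : pvCnt lines j = (pvCnt lines j - 1) + 1)]
      rw [List.replicate_succ, List.cons_append]
      rw [pvScanB_block (lines.length) acc run _ _ _
        (fun x hx => by have := pvBlocks_lb lines (j + 1) x hx; push_cast at this ⊢; omega)]
      have hcEq : ((pvCnt lines j - 1 : Nat) : Int) + 1 = ((pvCnt lines j : Nat) : Int) := by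
        omega
      have hiff : (2 * (((pvCnt lines j - 1 : Nat) : Int) + 1) ≥ (lines.length : Int))
          ↔ pvKeepB lines j = true := by
        rw [hcEq]
        simp only [pvKeepB, pvCnt, decide_eq_true_eq, ge_iff_le]
        constructor <;> intro h <;> exact_mod_cast h
      by_cases hk : pvKeepB lines j = true
      · rw [if_pos (hiff.mpr hk), if_pos hk]
      · rw [if_neg (fun h => hk (hiff.mp h)), if_neg hk]
    constructor
    · intro acc j hj
      by_cases hjW : j < pvW lines
      · by_cases hc : 0 < pvCnt lines j
        · rw [hstep acc none j hjW hc]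
          by_cases hk : pvKeepB lines j = true
          · rw [if_pos hk, pvFfrom_cons lines j hjW hk]
            show pvScanB (lines.length) acc (some ((j : Int), (j : Int))) (pvBlocks lines (j + 1))
                = acc ++ pvGroupRec [(j : Int)] (pvFfrom lines (j + 1))
            rw [show [(j : Int)] = pvSeg j (j + 1) from (pvSeg_single j).symm]
            exact ih.2 acc j j (j + 1) (le_refl j) (by omega) (by omega)
          · rw [if_neg hk, pvFfrom_skip lines j hjW (by simpa using hk)]
            exact ih.1 acc (j + 1) (by omega)
        · have hc0 : pvCnt lines j = 0 := by omega
          have hk : pvKeepB lines j = false := by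
            simp only [pvKeepB, decide_eq_false_iff_not]
            unfold pvCnt at hc0
            omega
          rw [pvBlocks_step lines j hjW, hc0, List.replicate_zero, List.nil_append,
            pvFfrom_skip lines j hjW hk]
          exact ih.1 acc (j + 1) (by omega)
      · rw [pvBlocks_nil lines j (by omega), pvFfrom_nil lines j (by omega), pvScanB_nil]
        show acc = acc ++ pvGroupTop []
        simp [pvGroupTop]
    · intro acc s e j hse hej hj
      by_cases hjW : j < pvW lines
      · by_cases hc : 0 < pvCnt lines j
        · rw [hstep acc _ j hjW hc]
          by_cases hk : pvKeepB lines j = true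
          · rw [if_pos hk, pvFfrom_cons lines j hjW hk]
            show (if (j : Int) = (e : Int) + 1 then
                    pvScanB (lines.length) acc (some ((s : Int), (j : Int))) (pvBlocks lines (j + 1))
                  else pvScanB (lines.length)
                      (acc ++ [(s : Int) + PySem.Int.floordiv ((e : Int) - (s : Int) + 1) 2])
                      (some ((j : Int), (j : Int))) (pvBlocks lines (j + 1)))
                = acc ++ pvGroupRec (pvSeg s (e + 1)) ((j : Int) :: pvFfrom lines (j + 1))
            rw [pvGroupRec]
            have hlast : (pvSeg s (e + 1)).getLastD 0 = (e : Int) := by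
              rw [pvSeg_getLastD s (e + 1) (by omega)]
              norm_num
            rw [hlast]
            by_cases hext : (j : Int) = (e : Int) + 1
            · have hje : j = e + 1 := by exact_mod_cast hext
              rw [if_pos hext, if_pos hext]
              rw [(by rw [hje]; exact pvSeg_concat s (e + 1) (by omega) :
                pvSeg s (e + 1) ++ [(j : Int)] = pvSeg s (j + 1))]
              exact ih.2 acc s j (j + 1) (by omega) (by omega) (by omega)
            · rw [if_neg hext, if_neg hext]
              rw [pvMidB s e hse]
              rw [show [(j : Int)] = pvSeg j (j + 1) from (pvSeg_single j).symm]
              rw [ih.2 (acc ++ [pvMid (pvSeg s (e + 1))]) j j (j + 1) (le_refl j) (by omega)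
                (by omega)]
              simp
          · rw [if_neg hk, pvFfrom_skip lines j hjW (by simpa using hk)]
            exact ih.2 acc s e (j + 1) hse (by omega) (by omega)
        · have hc0 : pvCnt lines j = 0 := by omega
          have hk : pvKeepB lines j = false := by
            simp only [pvKeepB, decide_eq_false_iff_not]
            unfold pvCnt at hc0
            omega
          rw [pvBlocks_step lines j hjW, hc0, List.replicate_zero, List.nil_append,
            pvFfrom_skip lines j hjW hk]
          exact ih.2 acc s e (j + 1) hse (by omega) (by omega)
      · rw [pvBlocks_nil lines j (by omega), pvFfrom_nil lines j (by omega), pvScanB_nil]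
        show acc ++ [(s : Int) + PySem.Int.floordiv ((e : Int) - (s : Int) + 1) 2]
            = acc ++ pvGroupRec (pvSeg s (e + 1)) []
        rw [pvGroupRec, pvMidB s e hse]

theorem pvGroupTop_pairwise (F : List Int) (h : F.Pairwise (· < ·)) :
    (pvGroupTop F).Pairwise (· < ·) := by
  cases F with
  | nil => simp [pvGroupTop]
  | cons x r => exact pvGroupRec_pairwise [x] r (by simp) (by simpa using h)

theorem pvFfrom_pairwise (lines : List String) (j : Nat) :
    (pvFfrom lines j).Pairwise (· < ·) := by
  unfold pvFfrom
  refine List.Pairwise.map _ (fun a b h => by exact_mod_cast h)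
    (List.Pairwise.filter _ (List.pairwise_lt_range' ..))

-- A's full computation, for nonempty input, is the grouped kept columns (already sorted)
theorem pvA_eq (lines : List String) (hne : lines ≠ []) :
    identify_column_positions_py lines
      = PySem.List.sorted (pvGroupTop (pvFfrom lines 0)) (fun x => x) := by
  rw [identify_column_positions_py, if_neg hne]
  show PySem.List.sorted
      (if ((PySem.List.sorted
              (((lines.foldl (fun d line => (PySem.List.enumerate line.toList 0).foldl pvDStep d)
                  PySem.Dict.empty).items.filter
                    (fun p => 2 * p.2 ≥ (lines.length : Int))).map (·.1)) (fun x => x)).foldl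
            pvStep ([], [])).2 = []
       then _ else _) (fun x => x) = _
  rw [pvSortedFreq lines hne]
  cases hF : pvFfrom lines 0 with
  | nil => rfl
  | cons x F' =>
    have hfirst : pvStep ([], []) x = ([], [x]) := by simp [pvStep]
    rw [List.foldl_cons, hfirst, pvFoldEq F' [] [x] (by simp)]
    rw [show pvGroupTop (x :: F') = pvGroupRec [x] F' from rfl]
    rfl

theorem pvB_eq (lines : List String) (hne : lines ≠ []) :
    identify_column_positions_py_alt lines
      = pvScanB (lines.length) [] none (pvBlocks lines 0) := by
  rw [identify_column_positions_py_alt, if_neg hne]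
  show pvScanB _ [] none (PySem.List.sorted _ _) = _
  rw [pvSortedPositions lines]

-- ===== VERDICT (by name: the statement is the Claim_ definition above) =====
theorem identify_column_positions_py_spec : Claim_equal_identify_column_positions_py := by
  unfold Claim_equal_identify_column_positions_py
  intro lines _
  unfold Spec_identify_column_positions_py
  by_cases hne : lines = []
  · subst hne; rfl
  · rw [pvA_eq lines hne, pvB_eq lines hne]
    rw [(pvScanMain lines hne (pvW lines)).1 [] 0 (by omega)]
    rw [List.nil_append]
    exact (PySem.List.sorted_eq_self_of_pairwise _ _
      ((pvGroupTop_pairwise _ (pvFfrom_pairwise lines 0)).imp le_of_lt))
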